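-- pv_equiv track=rewrite | github.com/ryanloftus/advent-of-code | 2025/4/part2.py | remove_maximal_rolls
-- ===== SOURCE A (Python) =====
-- DIRECTIONS = {
--     (1, 0),
--     (0, 1),
--     (-1, 0),
--     (0, -1),
--     (1, 1),
--     (1, -1),
--     (-1, 1),
--     (-1, -1)
-- }
--
-- def can_access(grid, x, y):
--     nearby_rolls = 0
--     for dx, dy in DIRECTIONS:
--         xp, yp = x+dx, y+dy
--         if yp >= 0 and yp < len(grid) and xp >= 0 and xp < len(grid[yp]) and grid[yp][xp] == "@":
--             nearby_rolls += 1
--     return nearby_rolls < 4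
--
-- def remove_maximal_rolls(grid):
--     while True:
--         mgrid = [[c for c in row] for row in grid]
--         changed = False
--         for y in range(len(grid)):
--             for x in range(len(grid[y])):
--                 if mgrid[y][x] == "@" and can_access(mgrid, x, y):
--                     mgrid[y][x] = "x"
--                     changed = True
--         if not changed:
--             return mgrid
--         grid = mgrid
-- ===== SOURCE B (Python) =====
-- DIRECTIONS = [(1, 0), (0, 1), (-1, 0), (0, -1), (1, 1), (1, -1), (-1, 1), (-1, -1)]
--
-- def remove_maximal_rolls(grid):
--     rows = [[c for c in row] for row in grid]
--     cells = [(x, y) for y in range(len(rows)) for x in range(len(rows[y])) if rows[y][x] == "@"]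
--     rolls = set(cells)
--     stack = list(cells)
--     while stack:
--         x, y = stack.pop()
--         if (x, y) in rolls and sum(((x + dx, y + dy) in rolls) for dx, dy in DIRECTIONS) < 4:
--             rolls.remove((x, y))
--             stack.extend((x + dx, y + dy) for dx, dy in DIRECTIONS)
--     return [["@" if (x, y) in rolls else ("x" if c == "@" else c)
--              for x, c in enumerate(row)] for y, row in enumerate(rows)]
-- ===== Notes on version B (the rewrite author's own statement) =====
-- stated objective: alternative
-- what changed: Replaces A's repeated full-grid sweeps to a fixed point with a single worklist peeling over the set of '@' coordinates (re-examining only neighbours of removed cells) and one final rendering pass; correctness rests on the uniqueness of the 4-core, proved in Lean. The worklist avoids A's worst-case re-scans of the whole grid per pass, but was not measurably faster on a timing run's inputs.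
import Mathlib
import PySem

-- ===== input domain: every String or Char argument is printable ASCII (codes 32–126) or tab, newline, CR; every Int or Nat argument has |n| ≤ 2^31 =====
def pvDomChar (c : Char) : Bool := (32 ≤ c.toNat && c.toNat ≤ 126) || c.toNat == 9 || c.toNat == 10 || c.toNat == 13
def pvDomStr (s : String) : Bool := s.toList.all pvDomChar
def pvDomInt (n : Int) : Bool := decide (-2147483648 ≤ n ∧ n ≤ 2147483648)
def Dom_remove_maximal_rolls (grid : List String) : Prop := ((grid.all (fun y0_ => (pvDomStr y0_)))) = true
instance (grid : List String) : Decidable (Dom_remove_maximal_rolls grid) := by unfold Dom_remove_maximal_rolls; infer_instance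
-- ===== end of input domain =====

-- B replaces A's repeated full-grid sweeps with a one-shot worklist peeling of the '@' coordinates
-- (re-checking only neighbours of removed cells) plus one rendering pass; objective: alternative algorithm.

-- ===== PORT A =====

-- DIRECTIONS (a Python set of 8 distinct pairs; only its count of matching members is ever used,
-- which does not depend on iteration order, so a fixed list is exact)
def pvDirs : List (Int × Int) := [(1,0),(0,1),(-1,0),(0,-1),(1,1),(1,-1),(-1,1),(-1,-1)]

-- the guarded access 'yp>=0 and yp<len(grid) and xp>=0 and xp<len(grid[yp]) and grid[yp][xp]=="@"'
def pvCell (g : List (List String)) (x y : Int) : Bool :=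
  decide (0 ≤ y) && decide (y < (g.length : Int)) && decide (0 ≤ x) &&
    decide (x < (((g.getD y.toNat []).length : Int))) && ((g.getD y.toNat []).getD x.toNat "" == "@")

-- nearby_rolls is the number of directions whose guarded access hits "@" (a countP over the 8 dirs)
def can_access (g : List (List String)) (x y : Int) : Bool :=
  decide (pvDirs.countP (fun d => pvCell g (x + d.1) (y + d.2)) < 4)

-- one body of the doubly nested loop: state = (mgrid, changed), p = (y, x)
def pvStep (st : List (List String) × Bool) (p : Nat × Nat) : List (List String) × Bool :=
  if ((st.1.getD p.1 []).getD p.2 "" == "@") && can_access st.1 (p.2 : Int) (p.1 : Int) then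
    (st.1.set p.1 ((st.1.getD p.1 []).set p.2 "x"), true)
  else st

-- the index pairs (y, x) visited by 'for y in range(len(grid)): for x in range(len(grid[y]))'
def pvPairs (g : List (List String)) : List (Nat × Nat) :=
  (List.range g.length).flatMap (fun y => (List.range (g.getD y []).length).map (fun x => (y, x)))

-- one full sweep of the while-body (mgrid starts as a copy of grid, changed = False)
def pvPass (g : List (List String)) : List (List String) × Bool :=
  (pvPairs g).foldl pvStep (g, false)

-- number of "@" cells; the termination measure of the while-loop
def pvAtCount (g : List (List String)) : Nat := (g.map (fun r => r.countP (fun c => c == "@"))).sum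

theorem pvSum_set_lt (l : List Nat) (i : Nat) (b : Nat) (hi : i < l.length) (hb : b < l.getD i 0) :
    (l.set i b).sum < l.sum := by
  induction l generalizing i with
  | nil => simp at hi
  | cons a t ih =>
    cases i with
    | zero => simp only [List.set, List.sum_cons]; simp only [List.getD_cons_zero] at hb; omega
    | succ j =>
      simp only [List.set, List.sum_cons]
      have := ih j (by simpa using hi) (by simpa using hb)
      omega

theorem pvCountP_set_lt (r : List String) (x : Nat) (h : r.getD x "" = "@") :
    (r.set x "x").countP (fun c => c == "@") < r.countP (fun c => c == "@") := by
  induction r generalizing x with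
  | nil => simp at h
  | cons a t ih =>
    cases x with
    | zero =>
      simp only [List.getD_cons_zero] at h
      subst h
      simp [List.set]
    | succ j =>
      simp only [List.getD_cons_succ] at h
      have := ih j h
      simp only [List.set, List.countP_cons]
      omega

theorem pvSet_decr (mg : List (List String)) (y x : Nat)
    (h : (mg.getD y []).getD x "" = "@") :
    pvAtCount (mg.set y ((mg.getD y []).set x "x")) < pvAtCount mg := by
  have hy : y < mg.length := by
    by_contra hy
    have hrow : mg.getD y [] = ([] : List String) := List.getD_eq_default _ _ (by omega)
    rw [hrow] at h
    simp at h
  unfold pvAtCount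
  rw [List.getD_eq_getElem _ _ hy]
  rw [List.map_set]
  apply pvSum_set_lt _ y _ (by simpa using hy)
  rw [List.getD_eq_getElem _ _ (by simpa using hy : y < (mg.map (fun r => r.countP (fun c => c == "@"))).length)]
  rw [List.getElem_map]
  have h2 := pvCountP_set_lt (mg.getD y []) x h
  rwa [List.getD_eq_getElem _ _ hy] at h2

theorem pvFoldl_decr (g : List (List String)) (l : List (Nat × Nat))
    (st : List (List String) × Bool)
    (hst : st = (g, false) ∨ (st.2 = true ∧ pvAtCount st.1 < pvAtCount g)) :
    l.foldl pvStep st = (g, false) ∨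
      ((l.foldl pvStep st).2 = true ∧ pvAtCount (l.foldl pvStep st).1 < pvAtCount g) := by
  induction l generalizing st with
  | nil => simpa using hst
  | cons p t ih =>
    simp only [List.foldl_cons]
    apply ih
    unfold pvStep
    split
    · next hcond =>
      right
      refine ⟨rfl, ?_⟩
      have hat : (st.1.getD p.1 []).getD p.2 "" = "@" := by
        have := (Bool.and_eq_true _ _).mp hcond |>.1
        simpa using this
      have hdec := pvSet_decr st.1 p.1 p.2 hat
      rcases hst with h | h
      · rw [h] at hdec ⊢; simpa using hdec
      · exact lt_trans hdec h.2
    · exact hst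

theorem pvPass_decr (g : List (List String)) (h : (pvPass g).2 = true) :
    pvAtCount (pvPass g).1 < pvAtCount g := by
  rcases pvFoldl_decr g (pvPairs g) (g, false) (Or.inl rfl) with hr | hr
  · unfold pvPass at h; rw [hr] at h; simp at h
  · exact hr.2

-- 'while True: … if not changed: return mgrid; grid = mgrid'
def pvLoopA (g : List (List String)) : List (List String) :=
  if h : (pvPass g).2 = true then pvLoopA (pvPass g).1 else (pvPass g).1
termination_by pvAtCount g
decreasing_by exact pvPass_decr g h

-- '[[c for c in row] for row in grid]' on the incoming list of strings (later copies are identity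
-- on the cells, so the conversion is hoisted out of the loop)
def pvConvA (grid : List String) : List (List String) :=
  grid.map (fun r => r.toList.map (fun c => String.mk [c]))

def remove_maximal_rolls (grid : List String) : List (List String) :=
  pvLoopA (pvConvA grid)

-- ===== PORT B =====

-- B's DIRECTIONS list
def pvDirsB : List (Int × Int) := [(1,0),(0,1),(-1,0),(0,-1),(1,1),(1,-1),(-1,1),(-1,-1)]

-- 'rows = [[c for c in row] for row in grid]'
def pvRowsB (grid : List String) : List (List String) :=
  grid.map (fun r => r.toList.map (fun c => String.mk [c]))

-- 'cells = [(x, y) for y in range(len(rows)) for x in range(len(rows[y])) if rows[y][x] == "@"]'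
def pvCellsB (rows : List (List String)) : List (Int × Int) :=
  (List.range rows.length).flatMap (fun y =>
    ((List.range (rows.getD y []).length).filter
      (fun x => (rows.getD y []).getD x "" == "@")).map (fun x : Nat => ((x : Int), (y : Int))))

-- 'sum(((x + dx, y + dy) in rolls) for dx, dy in DIRECTIONS)'
def pvDegB (rolls : List (Int × Int)) (x y : Int) : Nat :=
  pvDirsB.countP (fun d => decide ((x + d.1, y + d.2) ∈ rolls))

-- 'while stack: x, y = stack.pop(); …'  (rolls.remove on a member = List.erase, PySem.Set.remove?_eq_some_erase)
def pvLoopB (rolls : List (Int × Int)) (stack : List (Int × Int)) : List (Int × Int) :=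
  match hq : stack.getLast? with
  | none => rolls
  | some c =>
    if hc : c ∈ rolls ∧ pvDegB rolls c.1 c.2 < 4 then
      pvLoopB (rolls.erase c) (stack.dropLast ++ pvDirsB.map (fun d => (c.1 + d.1, c.2 + d.2)))
    else pvLoopB rolls stack.dropLast
termination_by (rolls.length, stack.length)
decreasing_by
  · refine Prod.Lex.left _ _ ?_
    have h1 := List.length_erase_of_mem hc.1
    have h2 : rolls ≠ [] := List.ne_nil_of_mem hc.1
    have h3 : 0 < rolls.length := List.length_pos_of_ne_nil h2
    omega
  · refine Prod.Lex.right _ ?_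
    have h1 : stack ≠ [] := by intro h; rw [h] at hq; simp at hq
    have h2 : 0 < stack.length := List.length_pos_of_ne_nil h1
    have h3 : stack.dropLast.length = stack.length - 1 := List.length_dropLast
    omega

def remove_maximal_rolls_alt (grid : List String) : List (List String) :=
  let rows := pvRowsB grid
  let cells := pvCellsB rows
  let rolls := pvLoopB (PySem.Set.ofList cells) cells
  (PySem.List.enumerate rows).map (fun yr =>
    (PySem.List.enumerate yr.2).map (fun xc =>
      if (xc.1, yr.1) ∈ rolls then "@" else if xc.2 == "@" then "x" else xc.2))

-- ===== PRECONDITION & SPEC =====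
def Spec_remove_maximal_rolls (grid : List String) (out : List (List String)) : Prop := out = remove_maximal_rolls_alt grid
instance (grid : List String) (out : List (List String)) : Decidable (Spec_remove_maximal_rolls grid out) := by unfold Spec_remove_maximal_rolls; infer_instance

-- ===== CLAIM (what is proved, stated in full; the proofs are below) =====
def Claim_equal_remove_maximal_rolls : Prop := ∀ (grid : List String), Dom_remove_maximal_rolls grid → Spec_remove_maximal_rolls grid (remove_maximal_rolls grid)

-- ===== LEMMAS AND PROOFS =====


-- degree of a membership predicate over the 8 directions
def pvDegF (f : Int → Int → Bool) (x y : Int) : Nat :=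
  pvDirs.countP (fun d => f (x + d.1) (y + d.2))

-- f is a "4-core" inside the '@' cells of g0: every member is an '@' cell of g0 with ≥ 4 member neighbours
def pvCoreP (g0 : List (List String)) (f : Int → Int → Bool) : Prop :=
  ∀ x y, f x y = true → pvCell g0 x y = true ∧ 4 ≤ pvDegF f x y

theorem pvDegF_mono {f h : Int → Int → Bool} (hfh : ∀ a b, f a b = true → h a b = true) (x y : Int) :
    pvDegF f x y ≤ pvDegF h x y :=
  List.countP_mono_left (fun _ _ hd => hfh _ _ hd)

theorem pvCan_access_eq (g : List (List String)) (x y : Int) :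
    can_access g x y = true ↔ pvDegF (pvCell g) x y < 4 := by
  simp [can_access, pvDegF]

theorem pvAt_bounds (mg : List (List String)) (y x : Nat)
    (h : (mg.getD y []).getD x "" = "@") : y < mg.length ∧ x < (mg.getD y []).length := by
  constructor
  · by_contra hy
    have hrow : mg.getD y [] = ([] : List String) := List.getD_eq_default _ _ (by omega)
    rw [hrow] at h; simp at h
  · by_contra hx
    rw [List.getD_eq_default _ _ (by omega)] at h; simp at h

theorem pvRow_set2 (mg : List (List String)) (y : Nat) (r' : List String) (hy : y < mg.length)
    (j : Nat) : (mg.set y r').getD j [] = if j = y then r' else mg.getD j [] := by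
  by_cases hj : j = y
  · subst hj
    rw [List.getD_eq_getElem?_getD, List.getElem?_set_self (by simpa using hy)]
    simp
  · rw [List.getD_eq_getElem?_getD, List.getElem?_set_ne (fun h => hj h.symm),
      ← List.getD_eq_getElem?_getD, if_neg hj]

theorem pvRowlen_set2 (mg : List (List String)) (y x : Nat) (hy : y < mg.length) (j : Nat) :
    ((mg.set y ((mg.getD y []).set x "x")).getD j []).length = (mg.getD j []).length := by
  rw [pvRow_set2 _ _ _ hy]
  split
  · next hj => subst hj; simp [List.length_set]
  · rfl

theorem pvEntry_set2 (mg : List (List String)) (y x : Nat) (hy : y < mg.length)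
    (hx : x < (mg.getD y []).length) (j i : Nat) :
    ((mg.set y ((mg.getD y []).set x "x")).getD j []).getD i "" =
      if j = y ∧ i = x then "x" else (mg.getD j []).getD i "" := by
  rw [pvRow_set2 _ _ _ hy]
  by_cases hj : j = y
  · subst hj
    rw [if_pos rfl]
    by_cases hi : i = x
    · subst hi
      rw [if_pos ⟨rfl, rfl⟩, List.getD_eq_getElem?_getD, List.getElem?_set_self hx]
      rfl
    · rw [if_neg (fun h => hi h.2), List.getD_eq_getElem?_getD,
        List.getElem?_set_ne (fun h => hi h.symm), ← List.getD_eq_getElem?_getD]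
  · rw [if_neg hj, if_neg (fun h => hj h.1)]

theorem pvCell_set2 (mg : List (List String)) (y x : Nat)
    (hAt : (mg.getD y []).getD x "" = "@") (a b : Int) :
    pvCell (mg.set y ((mg.getD y []).set x "x")) a b =
      if a = (x : Int) ∧ b = (y : Int) then false else pvCell mg a b := by
  obtain ⟨hy, hx⟩ := pvAt_bounds mg y x hAt
  by_cases hab : a = (x : Int) ∧ b = (y : Int)
  · rw [if_pos hab]
    obtain ⟨ha, hb⟩ := hab; subst ha; subst hb
    unfold pvCell
    simp only [Int.toNat_natCast]
    rw [pvEntry_set2 mg y x hy hx y x, if_pos ⟨rfl, rfl⟩]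
    simp
  · rw [if_neg hab]
    unfold pvCell
    rw [List.length_set]
    by_cases hbneg : (0:Int) ≤ b
    swap
    · simp [hbneg]
    by_cases haneg : (0:Int) ≤ a
    swap
    · simp [haneg]
    rw [pvRowlen_set2 mg y x hy b.toNat]
    have hent : ((mg.set y ((mg.getD y []).set x "x")).getD b.toNat []).getD a.toNat "" =
        (mg.getD b.toNat []).getD a.toNat "" := by
      rw [pvEntry_set2 mg y x hy hx b.toNat a.toNat, if_neg]
      intro ⟨h1, h2⟩
      exact hab ⟨by omega, by omega⟩
    rw [hent]

-- one loop body preserves any core below the current grid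
theorem pvStep_core (g0 : List (List String)) (f : Int → Int → Bool) (hf : pvCoreP g0 f)
    (st : List (List String) × Bool) (p : Nat × Nat)
    (hle : ∀ a b, f a b = true → pvCell st.1 a b = true) :
    ∀ a b, f a b = true → pvCell (pvStep st p).1 a b = true := by
  intro a b hfab
  unfold pvStep
  split
  · next hcond =>
    simp only
    obtain ⟨hat, hacc⟩ := Bool.and_eq_true_iff.mp hcond
    have hAt : (st.1.getD p.1 []).getD p.2 "" = "@" := by simpa using hat
    have hdeg : pvDegF (pvCell st.1) (p.2 : Int) (p.1 : Int) < 4 := (pvCan_access_eq _ _ _).mp hacc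
    rw [pvCell_set2 _ _ _ hAt, if_neg]
    · exact hle a b hfab
    · rintro ⟨ha, hb⟩
      subst ha; subst hb
      have h4 := (hf _ _ hfab).2
      have hmono := pvDegF_mono hle (p.2 : Int) (p.1 : Int)
      omega
  · exact hle a b hfab

theorem pvFoldl_core (g0 : List (List String)) (f : Int → Int → Bool) (hf : pvCoreP g0 f)
    (l : List (Nat × Nat)) (st : List (List String) × Bool)
    (hle : ∀ a b, f a b = true → pvCell st.1 a b = true) :
    ∀ a b, f a b = true → pvCell (l.foldl pvStep st).1 a b = true := by
  induction l generalizing st with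
  | nil => exact hle
  | cons p t ih => exact ih _ (pvStep_core g0 f hf st p hle)

theorem pvPass_core (g0 : List (List String)) (f : Int → Int → Bool) (hf : pvCoreP g0 f)
    (g : List (List String)) (hle : ∀ a b, f a b = true → pvCell g a b = true) :
    ∀ a b, f a b = true → pvCell (pvPass g).1 a b = true :=
  pvFoldl_core g0 f hf (pvPairs g) (g, false) hle

-- each pass only turns '@' cells into 'x', preserving everything else and all lengths
def pvPres (g g' : List (List String)) : Prop :=
  g'.length = g.length ∧ (∀ j : Nat, (g'.getD j []).length = (g.getD j []).length) ∧
    ∀ j i : Nat, (g'.getD j []).getD i "" = (g.getD j []).getD i "" ∨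
      ((g.getD j []).getD i "" = "@" ∧ (g'.getD j []).getD i "" = "x")

theorem pvPres_refl (g : List (List String)) : pvPres g g :=
  ⟨rfl, fun _ => rfl, fun _ _ => Or.inl rfl⟩

theorem pvPres_trans {g g' g'' : List (List String)} (h1 : pvPres g g') (h2 : pvPres g' g'') :
    pvPres g g'' := by
  obtain ⟨l1, rl1, e1⟩ := h1
  obtain ⟨l2, rl2, e2⟩ := h2
  refine ⟨l2.trans l1, fun j => (rl2 j).trans (rl1 j), fun j i => ?_⟩
  rcases e2 j i with h | h
  · rw [h]; exact e1 j i
  · rcases e1 j i with h' | h'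
    · exact Or.inr ⟨h' ▸ h.1, h.2⟩
    · exact Or.inr ⟨h'.1, h.2⟩

theorem pvStep_pres (g : List (List String)) (st : List (List String) × Bool) (p : Nat × Nat)
    (h : pvPres g st.1) : pvPres g (pvStep st p).1 := by
  unfold pvStep
  split
  · next hcond =>
    simp only
    obtain ⟨hat, _⟩ := Bool.and_eq_true_iff.mp hcond
    have hAt : (st.1.getD p.1 []).getD p.2 "" = "@" := by simpa using hat
    obtain ⟨hy, hx⟩ := pvAt_bounds st.1 p.1 p.2 hAt
    obtain ⟨l1, rl1, e1⟩ := h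
    refine ⟨(List.length_set).trans l1, fun j => (pvRowlen_set2 st.1 p.1 p.2 hy j).trans (rl1 j),
      fun j i => ?_⟩
    rw [pvEntry_set2 st.1 p.1 p.2 hy hx j i]
    by_cases hji : j = p.1 ∧ i = p.2
    · rw [if_pos hji]
      obtain ⟨h1, h2⟩ := hji; subst h1; subst h2
      right
      refine ⟨?_, rfl⟩
      rcases e1 p.1 p.2 with h' | h'
      · rw [← h']; exact hAt
      · rw [hAt] at h'; exact absurd h'.2 (by simp)
    · rw [if_neg hji]; exact e1 j i
  · exact h

theorem pvFoldl_pres (g : List (List String)) (l : List (Nat × Nat))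
    (st : List (List String) × Bool) (h : pvPres g st.1) : pvPres g (l.foldl pvStep st).1 := by
  induction l generalizing st with
  | nil => exact h
  | cons p t ih => exact ih _ (pvStep_pres g st p h)

theorem pvPass_pres (g : List (List String)) : pvPres g (pvPass g).1 :=
  pvFoldl_pres g (pvPairs g) (g, false) (pvPres_refl g)

theorem pvSnd_mono (l : List (Nat × Nat)) (st : List (List String) × Bool) (h : st.2 = true) :
    (l.foldl pvStep st).2 = true := by
  induction l generalizing st with
  | nil => exact h
  | cons p t ih =>
    apply ih
    unfold pvStep
    split
    · rfl
    · exact h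

theorem pvFoldl_false (g : List (List String)) (l : List (Nat × Nat))
    (h : (l.foldl pvStep (g, false)).2 = false) :
    l.foldl pvStep (g, false) = (g, false) ∧
      ∀ p ∈ l, (((g.getD p.1 []).getD p.2 "" == "@") &&
        can_access g (p.2 : Int) (p.1 : Int)) = false := by
  induction l with
  | nil => exact ⟨rfl, by simp⟩
  | cons p t ih =>
    simp only [List.foldl_cons] at h ⊢
    by_cases hcond : (((g.getD p.1 []).getD p.2 "" == "@") &&
        can_access g (p.2 : Int) (p.1 : Int)) = true
    · exfalso
      have hst : (pvStep (g, false) p).2 = true := by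
        unfold pvStep
        simp only
        rw [if_pos hcond]
      have := pvSnd_mono t (pvStep (g, false) p) hst
      rw [this] at h; simp at h
    · have hst : pvStep (g, false) p = (g, false) := by
        unfold pvStep
        simp only
        rw [if_neg hcond]
      rw [hst] at h
      obtain ⟨h1, h2⟩ := ih h
      refine ⟨by rw [hst]; exact h1, ?_⟩
      intro q hq
      rcases List.mem_cons.mp hq with rfl | hq'
      · exact Bool.eq_false_iff.mpr hcond
      · exact h2 q hq'

theorem pvLoopA_fix (g : List (List String)) : pvPass (pvLoopA g) = (pvLoopA g, false) := by
  fun_induction pvLoopA g with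
  | case1 g h ih => exact ih
  | case2 g h =>
    have hfold := (pvFoldl_false g (pvPairs g) (Bool.eq_false_iff.mpr h)).1
    have hpass : pvPass g = (g, false) := hfold
    rw [hpass]
    simpa using hpass

theorem pvLoopA_pres (g : List (List String)) : pvPres g (pvLoopA g) := by
  fun_induction pvLoopA g with
  | case1 g h ih => exact pvPres_trans (pvPass_pres g) ih
  | case2 g h =>
    have hpass : pvPass g = (g, false) := (pvFoldl_false g (pvPairs g) (Bool.eq_false_iff.mpr h)).1
    rw [hpass]
    exact pvPres_refl g

theorem pvLoopA_core_sub (g0 : List (List String)) (f : Int → Int → Bool) (hf : pvCoreP g0 f)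
    (g : List (List String)) :
    (∀ a b, f a b = true → pvCell g a b = true) →
      ∀ a b, f a b = true → pvCell (pvLoopA g) a b = true := by
  fun_induction pvLoopA g with
  | case1 g h ih => exact fun hle => ih (pvPass_core g0 f hf g hle)
  | case2 g h =>
    intro hle
    have hpass : pvPass g = (g, false) := (pvFoldl_false g (pvPairs g) (Bool.eq_false_iff.mpr h)).1
    rw [hpass]
    exact hle

theorem pvPres_cellLE {g g' : List (List String)} (h : pvPres g g') (a b : Int)
    (hc : pvCell g' a b = true) : pvCell g a b = true := by
  obtain ⟨l1, rl1, e1⟩ := h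
  unfold pvCell at hc ⊢
  simp only [Bool.and_eq_true, decide_eq_true_eq, beq_iff_eq] at hc ⊢
  obtain ⟨⟨⟨⟨hb0, hblt⟩, ha0⟩, halt⟩, hat⟩ := hc
  rw [l1] at hblt
  rw [rl1 b.toNat] at halt
  refine ⟨⟨⟨⟨hb0, hblt⟩, ha0⟩, halt⟩, ?_⟩
  rcases e1 b.toNat a.toNat with h' | h'
  · rw [← h']; exact hat
  · rw [hat] at h'; exact absurd h'.2 (by simp)

theorem pvLoopA_final_core (g : List (List String)) : pvCoreP g (pvCell (pvLoopA g)) := by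
  intro a b hcell
  refine ⟨pvPres_cellLE (pvLoopA_pres g) a b hcell, ?_⟩
  have hfix := pvLoopA_fix g
  have hcell' := hcell
  unfold pvCell at hcell'
  simp only [Bool.and_eq_true, decide_eq_true_eq, beq_iff_eq] at hcell'
  obtain ⟨⟨⟨⟨hb0, hblt⟩, ha0⟩, halt⟩, hat⟩ := hcell'
  have hp : (b.toNat, a.toNat) ∈ pvPairs (pvLoopA g) := by
    unfold pvPairs
    simp only [List.mem_flatMap, List.mem_map, List.mem_range]
    exact ⟨b.toNat, by omega, a.toNat, by omega, rfl⟩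
  have hff := pvFoldl_false (pvLoopA g) (pvPairs (pvLoopA g)) (by
    have hh : (pvPairs (pvLoopA g)).foldl pvStep ((pvLoopA g), false) = pvPass (pvLoopA g) := rfl
    rw [hh, hfix])
  have hcf := hff.2 _ hp
  simp only [hat] at hcf
  rw [Int.toNat_of_nonneg ha0, Int.toNat_of_nonneg hb0] at hcf
  simp only [beq_self_eq_true, Bool.true_and] at hcf
  have := (pvCan_access_eq (pvLoopA g) a b)
  rw [hcf] at this
  have hnot : ¬ pvDegF (pvCell (pvLoopA g)) a b < 4 := fun hlt => Bool.false_ne_true (this.mpr hlt ▸ rfl)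
  omega

-- ===== B-side lemmas =====

theorem pvDirsB_neg_mem {d : Int × Int} (hd : d ∈ pvDirsB) : ((-d.1, -d.2)) ∈ pvDirsB := by
  simp only [pvDirsB, List.mem_cons, List.not_mem_nil, or_false] at hd ⊢
  rcases hd with h|h|h|h|h|h|h|h <;> subst h <;> simp

theorem pvLoopB_sub (rolls stack : List (Int × Int)) :
    ∀ c ∈ pvLoopB rolls stack, c ∈ rolls := by
  fun_induction pvLoopB rolls stack with
  | case1 => exact fun c hc => hc
  | case2 rolls stack c hq hc ih => exact fun c' hc' => List.mem_of_mem_erase (ih c' hc')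
  | case3 rolls stack c hq hc ih => exact ih

theorem pvLoopB_final_deg (rolls stack : List (Int × Int)) :
    rolls.Nodup → (∀ c ∈ rolls, pvDegB rolls c.1 c.2 < 4 → c ∈ stack) →
      ∀ c ∈ pvLoopB rolls stack, 4 ≤ pvDegB (pvLoopB rolls stack) c.1 c.2 := by
  fun_induction pvLoopB rolls stack with
  | case1 rolls stack hq =>
    intro hnd hinv c hc
    by_contra hlt
    have := hinv c hc (by omega)
    rw [List.getLast?_eq_none_iff.mp hq] at this
    simp at this
  | case2 rolls stack c hq hc ih =>
    intro hnd hinv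
    apply ih (hnd.erase c)
    intro c' hc' hdeg'
    obtain ⟨hne, hmem⟩ := hnd.mem_erase_iff.mp hc'
    by_cases hall : ∀ d ∈ pvDirsB, decide ((c'.1 + d.1, c'.2 + d.2) ∈ rolls) = true →
        decide ((c'.1 + d.1, c'.2 + d.2) ∈ rolls.erase c) = true
    · have hmono : pvDegB rolls c'.1 c'.2 ≤ pvDegB (rolls.erase c) c'.1 c'.2 :=
        List.countP_mono_left hall
      have hin := hinv c' hmem (by omega)
      rw [← List.dropLast_append_getLast? c hq] at hin
      rcases List.mem_append.mp hin with h | h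
      · exact List.mem_append.mpr (Or.inl h)
      · simp only [List.mem_singleton] at h
        exact absurd h hne
    · push_neg at hall
      obtain ⟨d, hd, hp, hq2⟩ := hall
      have hmem2 : (c'.1 + d.1, c'.2 + d.2) ∈ rolls := of_decide_eq_true hp
      have hnotin : (c'.1 + d.1, c'.2 + d.2) ∉ rolls.erase c := fun hh => hq2 (decide_eq_true hh)
      have heqc : (c'.1 + d.1, c'.2 + d.2) = c := by
        by_contra hne2
        exact hnotin ((List.mem_erase_of_ne hne2).mpr hmem2)
      apply List.mem_append.mpr
      right
      simp only [List.mem_map]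
      refine ⟨(-d.1, -d.2), pvDirsB_neg_mem hd, ?_⟩
      have h1 : c'.1 + d.1 = c.1 := congrArg Prod.fst heqc
      have h2 : c'.2 + d.2 = c.2 := congrArg Prod.snd heqc
      have : (c.1 + -d.1, c.2 + -d.2) = (c'.1, c'.2) := by
        rw [Prod.mk.injEq]; omega
      rw [this]
  | case3 rolls stack c hq hc ih =>
    intro hnd hinv
    apply ih hnd
    intro c' hc' hdeg
    have hin := hinv c' hc' hdeg
    rw [← List.dropLast_append_getLast? c hq] at hin
    rcases List.mem_append.mp hin with h | h
    · exact h
    · simp only [List.mem_singleton] at h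
      subst h
      exact absurd ⟨hc', hdeg⟩ hc

theorem pvLoopB_core_sub (g0 : List (List String)) (f : Int → Int → Bool) (hf : pvCoreP g0 f)
    (rolls stack : List (Int × Int)) :
    (∀ a b, f a b = true → (a, b) ∈ rolls) →
      ∀ a b, f a b = true → (a, b) ∈ pvLoopB rolls stack := by
  fun_induction pvLoopB rolls stack with
  | case1 rolls stack hq => exact fun h => h
  | case2 rolls stack c hq hc ih =>
    intro h
    apply ih
    intro a b hfab
    have hm := h a b hfab
    have hne : (a, b) ≠ c := by
      rintro rfl
      have h4 := (hf a b hfab).2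
      have hmono : pvDegF f a b ≤ pvDegB rolls a b := by
        apply List.countP_mono_left
        intro d _ hp
        exact decide_eq_true (h _ _ hp)
      have h5 : pvDegB rolls a b < 4 := hc.2
      omega
    exact (List.mem_erase_of_ne hne).mpr hm
  | case3 rolls stack c hq hc ih => exact ih

theorem pvCellsB_mem (rows : List (List String)) (a b : Int) :
    ((a, b) ∈ pvCellsB rows) ↔ pvCell rows a b = true := by
  unfold pvCellsB
  rw [List.mem_flatMap]
  constructor
  · rintro ⟨y, hy, hmem⟩
    rw [List.mem_map] at hmem
    obtain ⟨x, hxf, hxe⟩ := hmem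
    rw [List.mem_filter, List.mem_range] at hxf
    obtain ⟨hxr, hat⟩ := hxf
    rw [List.mem_range] at hy
    have ha : (x : Int) = a := congrArg Prod.fst hxe
    have hb : (y : Int) = b := congrArg Prod.snd hxe
    subst ha; subst hb
    unfold pvCell
    simp only [Int.toNat_natCast]
    simp only [Bool.and_eq_true]
    exact ⟨⟨⟨⟨decide_eq_true (Int.natCast_nonneg y),
      decide_eq_true (show ((y : Int) < (rows.length : Int)) by exact_mod_cast hy)⟩,
      decide_eq_true (Int.natCast_nonneg x)⟩,
      decide_eq_true (show ((x : Int) < ((rows.getD y []).length : Int)) by exact_mod_cast hxr)⟩, hat⟩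
  · intro h
    unfold pvCell at h
    simp only [Bool.and_eq_true, decide_eq_true_eq, beq_iff_eq] at h
    obtain ⟨⟨⟨⟨hb0, hblt⟩, ha0⟩, halt⟩, hat⟩ := h
    refine ⟨b.toNat, ?_, ?_⟩
    · rw [List.mem_range]; omega
    · rw [List.mem_map]
      refine ⟨a.toNat, ?_, ?_⟩
      · rw [List.mem_filter, List.mem_range]
        exact ⟨by omega, by rw [hat]; exact beq_self_eq_true "@"⟩
      · rw [Prod.mk.injEq]
        constructor <;> omega

theorem pvDegB_eq_degF (rolls : List (Int × Int)) (x y : Int) :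
    pvDegB rolls x y = pvDegF (fun a b => decide ((a, b) ∈ rolls)) x y := rfl

theorem pvSetEq (grid : List String) (a b : Int) :
    pvCell (pvLoopA (pvConvA grid)) a b = true ↔
      (a, b) ∈ pvLoopB (PySem.Set.ofList (pvCellsB (pvRowsB grid))) (pvCellsB (pvRowsB grid)) := by
  have hrows : pvRowsB grid = pvConvA grid := rfl
  rw [hrows]
  have hcoreA : pvCoreP (pvConvA grid) (pvCell (pvLoopA (pvConvA grid))) :=
    pvLoopA_final_core (pvConvA grid)
  have hsub0 : ∀ a b : Int, (a, b) ∈ pvLoopB (PySem.Set.ofList (pvCellsB (pvConvA grid)))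
      (pvCellsB (pvConvA grid)) → pvCell (pvConvA grid) a b = true := by
    intro a b hm
    have := pvLoopB_sub _ _ _ hm
    exact (pvCellsB_mem _ a b).mp ((PySem.Set.mem_ofList _ _).mp this)
  have hcoreB : pvCoreP (pvConvA grid)
      (fun a b => decide ((a, b) ∈ pvLoopB (PySem.Set.ofList (pvCellsB (pvConvA grid)))
        (pvCellsB (pvConvA grid)))) := by
    intro a b hm
    simp only [decide_eq_true_eq] at hm
    refine ⟨hsub0 a b hm, ?_⟩
    have hdeg := pvLoopB_final_deg (PySem.Set.ofList (pvCellsB (pvConvA grid)))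
      (pvCellsB (pvConvA grid)) (PySem.Set.nodup_ofList _)
      (fun c hc _ => (PySem.Set.mem_ofList _ _).mp hc) _ hm
    rw [pvDegB_eq_degF] at hdeg
    exact hdeg
  constructor
  · intro hcell
    exact pvLoopB_core_sub (pvConvA grid) (pvCell (pvLoopA (pvConvA grid))) hcoreA _ _
      (fun a b h => (PySem.Set.mem_ofList _ _).mpr ((pvCellsB_mem _ a b).mpr
        (pvPres_cellLE (pvLoopA_pres (pvConvA grid)) a b h))) a b hcell
  · intro hm
    have := pvLoopA_core_sub (pvConvA grid) _ hcoreB (pvConvA grid)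
      (fun a b h => hsub0 a b (by simpa using h)) a b (by simpa using hm)
    exact this

theorem pvCell_natCast (g : List (List String)) (i j : Nat) (hj : j < g.length)
    (hi : i < (g.getD j []).length) :
    pvCell g (i : Int) (j : Int) = ((g.getD j []).getD i "" == "@") := by
  unfold pvCell
  simp only [Int.toNat_natCast]
  cases he : ((g.getD j []).getD i "" == "@") with
  | true =>
    simp only [he, Bool.and_true, Bool.and_eq_true]
    exact ⟨⟨⟨decide_eq_true (Int.natCast_nonneg j),
      decide_eq_true (show ((j : Int) < (g.length : Int)) by exact_mod_cast hj)⟩,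
      decide_eq_true (Int.natCast_nonneg i)⟩,
      decide_eq_true (show ((i : Int) < ((g.getD j []).length : Int)) by exact_mod_cast hi)⟩
  | false => simp only [he, Bool.and_false]

theorem remove_maximal_rolls_main (grid : List String) :
    remove_maximal_rolls grid = remove_maximal_rolls_alt grid := by
  unfold remove_maximal_rolls remove_maximal_rolls_alt
  have hrows : pvRowsB grid = pvConvA grid := rfl
  rw [hrows]
  have hpres := pvLoopA_pres (pvConvA grid)
  obtain ⟨hlen, hrowlen, hentry⟩ := hpres
  apply List.ext_getElem
  · simp only [List.length_map, PySem.List.length_enumerate]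
    exact hlen
  · intro j hj1 hj2
    simp only [List.length_map, PySem.List.length_enumerate] at hj2
    rw [List.getElem_map, PySem.List.getElem_enumerate _ _ j (by
      rw [PySem.List.length_enumerate]; exact hj2)]
    simp only [zero_add]
    apply List.ext_getElem
    · simp only [List.length_map, PySem.List.length_enumerate]
      have := hrowlen j
      rw [List.getD_eq_getElem _ _ hj1, List.getD_eq_getElem _ _ hj2] at this
      exact this
    · intro i hi1 hi2
      simp only [List.length_map, PySem.List.length_enumerate] at hi2
      rw [List.getElem_map, PySem.List.getElem_enumerate _ _ i (by
        rw [PySem.List.length_enumerate]; exact hi2)]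
      simp only [zero_add]
      -- the cell value in the original grid
      have hjlenA : j < (pvLoopA (pvConvA grid)).length := hj1
      have hgetDj : (pvLoopA (pvConvA grid)).getD j [] = (pvLoopA (pvConvA grid))[j] :=
        List.getD_eq_getElem _ _ hj1
      have hgetDj0 : (pvConvA grid).getD j [] = (pvConvA grid)[j] :=
        List.getD_eq_getElem _ _ hj2
      have hgetDi : ((pvLoopA (pvConvA grid)).getD j []).getD i "" =
          (pvLoopA (pvConvA grid))[j][i] := by
        rw [hgetDj]; exact List.getD_eq_getElem _ _ hi1
      have hgetDi0 : ((pvConvA grid).getD j []).getD i "" = (pvConvA grid)[j][i] := by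
        rw [hgetDj0]; exact List.getD_eq_getElem _ _ hi2
      have hset := pvSetEq grid (i : Int) (j : Int)
      rw [hrows] at hset
      have hcellA : pvCell (pvLoopA (pvConvA grid)) (i : Int) (j : Int) =
          ((pvLoopA (pvConvA grid))[j][i] == "@") := by
        rw [pvCell_natCast _ i j hj1 (by rw [hgetDj]; exact hi1), hgetDi]
      have hcell0 : pvCell (pvConvA grid) (i : Int) (j : Int) =
          ((pvConvA grid)[j][i] == "@") := by
        rw [pvCell_natCast _ i j hj2 (by rw [hgetDj0]; exact hi2), hgetDi0]
      have hent := hentry j i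
      rw [hgetDi, hgetDi0] at hent
      by_cases hc : (pvConvA grid)[j][i] = "@"
      · by_cases hf : (pvLoopA (pvConvA grid))[j][i] = "@"
        · have hmem : ((i : Int), (j : Int)) ∈ pvLoopB
              (PySem.Set.ofList (pvCellsB (pvConvA grid))) (pvCellsB (pvConvA grid)) := by
            apply hset.mp
            rw [hcellA, hf]
            simp
          rw [if_pos hmem, hf]
        · have hnmem : ¬ (((i : Int), (j : Int)) ∈ pvLoopB
              (PySem.Set.ofList (pvCellsB (pvConvA grid))) (pvCellsB (pvConvA grid))) := by
            intro hm
            have := hset.mpr hm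
            rw [hcellA] at this
            exact hf (by simpa using this)
          rw [if_neg hnmem, if_pos (by simp [hc])]
          rcases hent with h | h
          · exact absurd (h.trans hc) hf
          · exact h.2
      · have hnmem : ¬ (((i : Int), (j : Int)) ∈ pvLoopB
            (PySem.Set.ofList (pvCellsB (pvConvA grid))) (pvCellsB (pvConvA grid))) := by
          intro hm
          have := pvPres_cellLE ⟨hlen, hrowlen, hentry⟩ (i : Int) (j : Int) (hset.mpr hm)
          rw [hcell0] at this
          exact hc (by simpa using this)
        rw [if_neg hnmem, if_neg (by simpa using hc)]
        rcases hent with h | h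
        · exact h
        · exact absurd h.1 hc

-- ===== VERDICT (by name: the statement is the Claim_ definition above) =====
theorem remove_maximal_rolls_spec : Claim_equal_remove_maximal_rolls := by
  intro grid _
  unfold Spec_remove_maximal_rolls
  exact remove_maximal_rolls_main grid
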